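-- pv_equiv track=rewrite | github.com/RealRyanNichols/RepWatchr | scripts/import-texas-officials.py | office_payload
-- ===== SOURCE A (Python) =====
-- from typing import Any
--
-- def office_payload(offices: list[dict[str, Any]]) -> tuple[str | None, str | None]:
--     for classification in ["capitol", "capitol-mail", "district"]:
--         for office in offices:
--             if office.get("classification") == classification:
--                 address = office.get("address")
--                 phone = office.get("voice")
--                 return address, phone
--     return None, None
-- ===== SOURCE B (Python) =====
-- def office_payload(offices):
--     priority = {"capitol": 0, "capitol-mail": 1, "district": 2}
--     best_rank = 3
--     best = (None, None)
--     for office in offices: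
--         rank = priority.get(office.get("classification"), 3)
--         if rank < best_rank:
--             best_rank = rank
--             best = (office.get("address"), office.get("voice"))
--     return best
-- ===== Notes on version B (the rewrite author's own statement) =====
-- stated objective: alternative
-- what changed: Replaces A's three priority-ordered rescans of the office list with a single fold that keeps the best (lowest-priority-rank) office seen so far, ranking classifications via a priority table; strict comparison preserves the first-occurrence tie-break.
import Mathlib
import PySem

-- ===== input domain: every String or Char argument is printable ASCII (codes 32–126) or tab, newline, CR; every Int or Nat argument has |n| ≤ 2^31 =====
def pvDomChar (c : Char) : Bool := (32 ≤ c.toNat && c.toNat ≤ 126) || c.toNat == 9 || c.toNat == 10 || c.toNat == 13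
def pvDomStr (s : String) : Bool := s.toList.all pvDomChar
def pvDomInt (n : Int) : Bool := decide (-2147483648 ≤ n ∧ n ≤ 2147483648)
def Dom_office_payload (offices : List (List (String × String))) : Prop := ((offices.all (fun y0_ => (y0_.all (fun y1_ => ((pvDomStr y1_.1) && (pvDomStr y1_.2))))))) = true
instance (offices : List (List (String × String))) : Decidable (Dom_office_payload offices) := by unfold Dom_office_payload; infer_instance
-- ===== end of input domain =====

-- B replaces A's three priority-ordered rescans with a single best-so-far fold
-- ranked by a priority table (alternative decomposition; return values proved identical).

-- office.get(k): first-match lookup in the association list (shared input accessor)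
def pvGet (office : List (String × String)) (k : String) : Option String :=
  (office.find? (fun p => p.1 == k)).map (·.2)

-- ===== PORT A =====
-- inner 'for office in offices: if … return (address, phone)' loop of A
def pvScanA (c : String) : List (List (String × String)) → Option (Option String × Option String)
  | [] => none
  | office :: rest =>
      if pvGet office "classification" = some c then
        some (pvGet office "address", pvGet office "voice")
      else pvScanA c rest

def office_payload (offices : List (List (String × String))) : Option String × Option String :=
  match pvScanA "capitol" offices with
  | some r => r
  | none =>
    match pvScanA "capitol-mail" offices with
    | some r => r
    | none =>
      match pvScanA "district" offices with
      | some r => r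
      | none => (none, none)

-- ===== PORT B =====
-- the 'priority' dict of Source B
def pvPrio : PySem.Dict String Nat :=
  ((PySem.Dict.empty.insert "capitol" 0).insert "capitol-mail" 1).insert "district" 2

-- rank = priority.get(office.get("classification"), 3)
def pvRank (office : List (String × String)) : Nat :=
  match pvGet office "classification" with
  | some c => (pvPrio.get? c).getD 3
  | none => 3

-- one step of Source B's loop: state = (best_rank, best)
def pvStep (s : Nat × (Option String × Option String)) (office : List (String × String)) :
    Nat × (Option String × Option String) :=
  if pvRank office < s.1 then
    (pvRank office, (pvGet office "address", pvGet office "voice"))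
  else s

def office_payload_alt (offices : List (List (String × String))) : Option String × Option String :=
  (offices.foldl pvStep (3, (none, none))).2

-- ===== PRECONDITION & SPEC =====
def Spec_office_payload (offices : List (List (String × String))) (out : Option String × Option String) : Prop := out = office_payload_alt offices
instance (offices : List (List (String × String))) (out : Option String × Option String) : Decidable (Spec_office_payload offices out) := by unfold Spec_office_payload; infer_instance

-- ===== CLAIM (what is proved, stated in full; the proofs are below) =====
def Claim_equal_office_payload : Prop := ∀ (offices : List (List (String × String))), Dom_office_payload offices → Spec_office_payload offices (office_payload offices)

-- ===== LEMMAS AND PROOFS =====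

-- the rank of an office is 0/1/2 exactly for the three priority classifications, else 3
theorem pvRank_cases (office : List (String × String)) :
    (pvRank office = 0 ∧ pvGet office "classification" = some "capitol") ∨
    (pvRank office = 1 ∧ pvGet office "classification" = some "capitol-mail") ∨
    (pvRank office = 2 ∧ pvGet office "classification" = some "district") ∨
    (pvRank office = 3 ∧ pvGet office "classification" ≠ some "capitol" ∧
      pvGet office "classification" ≠ some "capitol-mail" ∧
      pvGet office "classification" ≠ some "district") := by
  unfold pvRank
  cases h : pvGet office "classification" with
  | none => right; right; right; simp
  | some c =>
    by_cases h0 : c = "capitol"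
    · subst h0; exact Or.inl ⟨by decide, rfl⟩
    · by_cases h1 : c = "capitol-mail"
      · subst h1; exact Or.inr (Or.inl ⟨by decide, rfl⟩)
      · by_cases h2 : c = "district"
        · subst h2; exact Or.inr (Or.inr (Or.inl ⟨by decide, rfl⟩))
        · refine Or.inr (Or.inr (Or.inr ⟨?_, by simp [h0], by simp [h1], by simp [h2]⟩))
          have hp : pvPrio = PySem.Dict.mk
              [("capitol", 0), ("capitol-mail", 1), ("district", 2)] := by decide
          simp [hp, PySem.Dict.get?, beq_iff_eq, Ne.symm h0, Ne.symm h1, Ne.symm h2]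

-- explicit characterisation of B's fold from an arbitrary state, as a cascade of A's scans
def pvCascade (br : Nat) (b : Option String × Option String)
    (offices : List (List (String × String))) : Nat × (Option String × Option String) :=
  match (if 0 < br then pvScanA "capitol" offices else none) with
  | some p => (0, p)
  | none =>
    match (if 1 < br then pvScanA "capitol-mail" offices else none) with
    | some p => (1, p)
    | none =>
      match (if 2 < br then pvScanA "district" offices else none) with
      | some p => (2, p)
      | none => (br, b)

theorem pvFold_eq_cascade :
    ∀ (offices : List (List (String × String))) (br : Nat)
      (b : Option String × Option String), br ≤ 3 →
      offices.foldl pvStep (br, b) = pvCascade br b offices := by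
  intro offices
  induction offices with
  | nil => intro br b _; simp [pvCascade, pvScanA]
  | cons office rest ih =>
    intro br b hbr
    simp only [List.foldl_cons]
    rcases pvRank_cases office with ⟨hr, hc⟩ | ⟨hr, hc⟩ | ⟨hr, hc⟩ | ⟨hr, h0, h1, h2⟩
    · interval_cases br <;>
        simp [pvStep, hr, hc, ih, pvCascade, pvScanA]
    · interval_cases br <;>
        simp [pvStep, hr, hc, ih, pvCascade, pvScanA]
    · interval_cases br <;>
        simp [pvStep, hr, hc, ih, pvCascade, pvScanA]
    · interval_cases br <;>
        simp [pvStep, hr, h0, h1, h2, ih, pvCascade, pvScanA]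

-- ===== VERDICT (by name: the statement is the Claim_ definition above) =====
theorem office_payload_spec : Claim_equal_office_payload := by
  intro offices _
  unfold Spec_office_payload office_payload office_payload_alt
  rw [pvFold_eq_cascade offices 3 (none, none) (by omega)]
  unfold pvCascade
  simp only [show (0:Nat) < 3 from by omega, show (1:Nat) < 3 from by omega,
    show (2:Nat) < 3 from by omega, if_true]
  cases pvScanA "capitol" offices <;> cases pvScanA "capitol-mail" offices <;>
    cases pvScanA "district" offices <;> rfl
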